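-- pv_equiv track=rewrite | github.com/andriitugai/leetcode-daily-challenges | from-3601-to-3700/3602-hexadecimal-and-hexatrigesimal-conversion/solution.py | concatHex36
-- ===== SOURCE A (Python) =====
-- def concatHex36(n: int) -> str:
--     def toBase(x: int, b: int) -> str:
--         symb = '0123456789ABCDEFGHIJKLMNOPQRSTUVWXYZ'
--         result = ''
--         while x > 0:
--             result = symb[x % b] + result
--             x //= b
--         return result
--
--     return toBase(n * n, 16) + toBase(n * n * n, 36)
-- ===== SOURCE B (Python) =====
-- def concatHex36(n: int) -> str:
--     symb = '0123456789ABCDEFGHIJKLMNOPQRSTUVWXYZ'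
--
--     def toBase(x: int, b: int) -> str:
--         if x <= 0:
--             return ''
--         # find the highest power of b not exceeding x, then emit digits
--         # most-significant first by repeated division by that power.
--         p = 1
--         while p * b <= x:
--             p *= b
--         out = []
--         while p > 0:
--             out.append(symb[x // p])
--             x %= p
--             p //= b
--         return ''.join(out)
--
--     return toBase(n * n, 16) + toBase(n * n * n, 36)
-- ===== Notes on version B (the rewrite author's own statement) =====
-- stated objective: alternative
-- what changed: toBase no longer builds the string least-significant digit first by prepending inside a single division loop; instead it first finds the highest power of the base not exceeding x and then emits digits most-significant first by dividing by that shrinking power (x //= is replaced by x %= p, p //= b), joining an appended list.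
import Mathlib
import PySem

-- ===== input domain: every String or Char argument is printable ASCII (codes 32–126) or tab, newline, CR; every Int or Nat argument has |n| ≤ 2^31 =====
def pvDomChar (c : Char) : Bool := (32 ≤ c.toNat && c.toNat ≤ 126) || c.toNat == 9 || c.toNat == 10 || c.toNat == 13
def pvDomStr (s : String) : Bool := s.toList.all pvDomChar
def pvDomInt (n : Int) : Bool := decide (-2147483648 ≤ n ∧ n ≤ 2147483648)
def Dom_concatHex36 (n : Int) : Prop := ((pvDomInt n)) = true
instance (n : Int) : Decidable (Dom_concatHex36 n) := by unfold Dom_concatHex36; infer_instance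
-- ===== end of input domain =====

-- B replaces A's LSB-first prepend loop by a different algorithm: it first finds the
-- highest power of the base not exceeding x, then emits digits most-significant first
-- by dividing by that shrinking power — objective: alternative.

-- the shared symbol table '0123456789ABCDEFGHIJKLMNOPQRSTUVWXYZ', as code points
def pvSymb : List Char := "0123456789ABCDEFGHIJKLMNOPQRSTUVWXYZ".toList

-- ===== PORT A =====
-- A's while-loop `while x > 0: result = symb[x % b] + result; x //= b`, with fuel
-- (x.toNat + 1 steps always suffice: each iteration has x > 0 and 16 ≤ b, so x strictly decreases).
def pvToBaseLoop (fuel : Nat) (x b : Int) (result : List Char) : List Char :=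
  match fuel with
  | 0 => result
  | f + 1 =>
    if 0 < x then
      pvToBaseLoop f (PySem.Int.floordiv x b) b
        (PySem.List.pyGetD pvSymb (PySem.Int.mod x b) ' ' :: result)
    else result

def concatHex36 (n : Int) : String :=
  String.ofList (pvToBaseLoop ((n * n).toNat + 1) (n * n) 16 []
    ++ pvToBaseLoop ((n * n * n).toNat + 1) (n * n * n) 36 [])

-- ===== PORT B =====
-- B's first loop `while p * b <= x: p *= b`, with fuel (x.toNat + 1 suffices: p at least doubles)
def pvFindPow (fuel : Nat) (x b p : Int) : Int :=
  match fuel with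
  | 0 => p
  | f + 1 => if p * b ≤ x then pvFindPow f x b (p * b) else p

-- B's second loop `while p > 0: out.append(symb[x // p]); x %= p; p //= b`
def pvEmit (fuel : Nat) (x p b : Int) (out : List Char) : List Char :=
  match fuel with
  | 0 => out
  | f + 1 =>
    if 0 < p then
      pvEmit f (PySem.Int.mod x p) (PySem.Int.floordiv p b) b
        (out ++ [PySem.List.pyGetD pvSymb (PySem.Int.floordiv x p) ' '])
    else out

def pvToBase (x b : Int) : List Char :=
  if x ≤ 0 then []
  else pvEmit (x.toNat + 1) x (pvFindPow (x.toNat + 1) x b 1) b []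

def concatHex36_alt (n : Int) : String :=
  String.ofList (pvToBase (n * n) 16 ++ pvToBase (n * n * n) 36)

-- ===== PRECONDITION & SPEC =====
def Spec_concatHex36 (n : Int) (out : String) : Prop := out = concatHex36_alt n
instance (n : Int) (out : String) : Decidable (Spec_concatHex36 n out) := by unfold Spec_concatHex36; infer_instance

-- ===== CLAIM (what is proved, stated in full; the proofs are below) =====
def Claim_equal_concatHex36 : Prop := ∀ (n : Int), Dom_concatHex36 n → Spec_concatHex36 n (concatHex36 n)

-- ===== LEMMAS AND PROOFS =====

-- digit d rendered through the symbol table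
def pvChN (d : Nat) : Char := PySem.List.pyGetD pvSymb (d : Int) ' '

-- canonical digit string of X in base B (most-significant first)
def pvCanon (B X : Nat) : List Char := ((Nat.digits B X).map pvChN).reverse

-- the m digits of X at powers B^(m-1) … B^0 (most-significant first)
def pvM (B m X : Nat) : List Char :=
  (List.range m).reverse.map (fun i => pvChN (X / B ^ i % B))

theorem pvCanon_zero (B : Nat) : pvCanon B 0 = [] := by simp [pvCanon]

theorem pvCanon_pos (B X : Nat) (hB : 2 ≤ B) (hX : 0 < X) :
    pvCanon B X = pvCanon B (X / B) ++ [pvChN (X % B)] := by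
  unfold pvCanon
  rw [Nat.digits_def' (by omega) hX]
  simp

theorem pvDigits_getD (B : Nat) (hB : 2 ≤ B) :
    ∀ (i X : Nat), (Nat.digits B X).getD i 0 = X / B ^ i % B := by
  intro i
  induction i with
  | zero =>
    intro X
    rcases Nat.eq_zero_or_pos X with h | h
    · simp [h]
    · rw [Nat.digits_def' (by omega) h]; simp
  | succ i ih =>
    intro X
    rcases Nat.eq_zero_or_pos X with h | h
    · simp [h, Nat.zero_div]
    · rw [Nat.digits_def' (by omega) h]
      simpa [Nat.div_div_eq_div_mul, ← Nat.pow_succ'] using ih (X / B)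

theorem pvDigits_length (B k X : Nat) (hB : 2 ≤ B) (h1 : B ^ k ≤ X) (h2 : X < B ^ (k + 1)) :
    (Nat.digits B X).length = k + 1 := by
  have hle : (Nat.digits B X).length ≤ k + 1 := (Nat.digits_length_le_iff (by omega) X).mpr h2
  have hlt : k < (Nat.digits B X).length := (Nat.lt_digits_length_iff (by omega) X).mpr h1
  omega

theorem pvM_eq_canon (B k X : Nat) (hB : 2 ≤ B) (h1 : B ^ k ≤ X) (h2 : X < B ^ (k + 1)) :
    pvM B (k + 1) X = pvCanon B X := by
  have hlen : (Nat.digits B X).length = k + 1 := pvDigits_length B k X hB h1 h2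
  apply List.ext_getElem
  · simp [pvM, pvCanon, hlen]
  · intro i hi₁ hi₂
    simp only [pvM, pvCanon, List.getElem_map, List.getElem_reverse, List.length_map,
      List.length_range, hlen] at *
    rw [List.getElem_range]
    rw [← List.getD_eq_getElem _ 0 (by omega), pvDigits_getD B hB]

-- the second loop is a no-op once p = 0
theorem pvEmit_zero (f : Nat) (x b : Int) (out : List Char) : pvEmit f x 0 b out = out := by
  cases f <;> simp [pvEmit]

-- B's emit loop, started at p = B^k with x < B^(k+1), produces the k+1 digits of x
theorem pvEmit_eq (B : Nat) (hB : 2 ≤ B) :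
    ∀ (k f : Nat) (X : Nat) (out : List Char), k < f → (X : Int) < (B : Int) ^ (k + 1) →
      pvEmit f (X : Int) ((B : Int) ^ k) (B : Int) out = out ++ pvM B (k + 1) X := by
  intro k
  induction k with
  | zero =>
    intro f X out hf hX
    obtain ⟨f, rfl⟩ : ∃ g, f = g + 1 := ⟨f - 1, by omega⟩
    have hXB : X < B := by rw [zero_add, pow_one] at hX; exact_mod_cast hX
    simp only [pvEmit, pow_zero, if_pos (by norm_num : (0:Int) < 1)]
    have h1 : (1 : Int) = ((1 : Nat) : Int) := by norm_num
    rw [show PySem.Int.mod (X : Int) 1 = ((X % 1 : Nat) : Int) by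
          exact_mod_cast PySem.Int.mod_natCast X 1,
        show PySem.Int.floordiv (X : Int) 1 = ((X / 1 : Nat) : Int) by
          exact_mod_cast PySem.Int.floordiv_natCast X 1,
        show PySem.Int.floordiv 1 (B : Int) = ((1 / B : Nat) : Int) by
          exact_mod_cast PySem.Int.floordiv_natCast 1 B,
        Nat.div_eq_of_lt (by omega)]
    rw [show ((0:Nat) : Int) = 0 from rfl, pvEmit_zero]
    have hM : pvM B 1 X = [pvChN X] := by
      simp [pvM, Nat.mod_eq_of_lt hXB]
    rw [hM]
    simp [pvChN]
  | succ k ih =>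
    intro f X out hf hX
    obtain ⟨f, rfl⟩ : ∃ g, f = g + 1 := ⟨f - 1, by omega⟩
    have hp : (0 : Int) < (B : Int) ^ (k + 1) := by positivity
    simp only [pvEmit, if_pos hp]
    have hcast : ((B : Int)) ^ (k + 1) = ((B ^ (k + 1) : Nat) : Int) := by push_cast; ring
    have hXb : X < B ^ (k + 2) := by
      have : (X : Int) < ((B ^ (k + 2) : Nat) : Int) := by push_cast at hX ⊢; exact hX
      exact_mod_cast this
    rw [hcast,
        show PySem.Int.mod (X : Int) ((B ^ (k+1) : Nat) : Int) = ((X % B ^ (k+1) : Nat) : Int) from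
          PySem.Int.mod_natCast X (B ^ (k+1)),
        show PySem.Int.floordiv ((B ^ (k+1) : Nat) : Int) (B : Int) = ((B ^ (k+1) / B : Nat) : Int) from
          PySem.Int.floordiv_natCast (B ^ (k+1)) B,
        show PySem.Int.floordiv (X : Int) ((B ^ (k+1) : Nat) : Int) = ((X / B ^ (k+1) : Nat) : Int) from
          PySem.Int.floordiv_natCast X (B ^ (k+1)),
        show B ^ (k + 1) / B = B ^ k by
          rw [Nat.pow_succ, Nat.mul_div_cancel _ (by omega)]]
    have hlt : (X % B ^ (k+1) : Nat) < B ^ (k + 1) := Nat.mod_lt _ (by positivity)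
    rw [show ((B ^ k : Nat) : Int) = (B:Int) ^ k by push_cast; ring]
    rw [ih f (X % B ^ (k+1)) _ (by omega)
          (by exact_mod_cast (by push_cast; exact_mod_cast hlt : ((X % B ^ (k+1) : Nat) : Int) < ((B ^ (k+1) : Nat) : Int)))]
    -- it remains to align the digit lists
    have hhead : X / B ^ (k + 1) % B = X / B ^ (k + 1) := by
      have hlt2 : X < B * B ^ (k + 1) := by rw [← Nat.pow_succ']; exact hXb
      exact Nat.mod_eq_of_lt ((Nat.div_lt_iff_lt_mul (by positivity)).mpr hlt2)
    have htail : (List.range (k + 1)).reverse.map (fun i => pvChN (X / B ^ i % B))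
        = pvM B (k + 1) (X % B ^ (k + 1)) := by
      unfold pvM
      apply List.map_congr_left
      intro i hi
      have hik : i < k + 1 := by simpa using hi
      congr 1
      rw [← Nat.mod_mul_right_div_self X (B ^ i) B,
        ← Nat.mod_mul_right_div_self (X % B ^ (k + 1)) (B ^ i) B, ← Nat.pow_succ,
        Nat.mod_mod_of_dvd _ (pow_dvd_pow B (by omega : i + 1 ≤ k + 1))]
    rw [htail.symm]
    simp only [pvM, List.range_succ, List.reverse_append, List.reverse_singleton, List.map_cons,
      List.map_append]
    simp [pvChN, hhead]

-- B's power-finding loop returns the largest power B^k ≤ x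
theorem pvFindPow_spec (B : Nat) (hB : 2 ≤ B) (x : Int) (_hx : 1 ≤ x) :
    ∀ (f : Nat) (p : Int) (k : Nat), p = (B : Int) ^ k → p ≤ x → x < p * 2 ^ f →
      ∃ k', pvFindPow f x (B : Int) p = (B : Int) ^ k' ∧
        (B : Int) ^ k' ≤ x ∧ x < (B : Int) ^ (k' + 1) := by
  intro f
  induction f with
  | zero =>
    intro p k hpk hpx hxp
    simp at hxp
    omega
  | succ f ih =>
    intro p k hpk hpx hxp
    simp only [pvFindPow]
    split_ifs with h
    · refine ih (p * (B : Int)) (k + 1) (by rw [hpk]; ring) h ?_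
      have hp0 : (0 : Int) < p := by rw [hpk]; positivity
      have h2B : (2 : Int) ≤ (B : Int) := by exact_mod_cast hB
      have : p * 2 ^ (f + 1) ≤ p * (B : Int) * 2 ^ f := by
        have h2f : (0:Int) < 2 ^ f := by positivity
        calc p * 2 ^ (f + 1) = (p * 2) * 2 ^ f := by ring
          _ ≤ (p * B) * 2 ^ f := by
              apply mul_le_mul_of_nonneg_right _ (le_of_lt h2f)
              exact mul_le_mul_of_nonneg_left h2B (le_of_lt hp0)
      omega
    · exact ⟨k, hpk, hpk ▸ hpx, by rw [pow_succ, ← hpk]; omega⟩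

-- A's loop computes the canonical digit string (prepended to the accumulator)
theorem pvLoopNat (B : Nat) (hB : 2 ≤ B) :
    ∀ (f X : Nat) (acc : List Char), X < f →
      pvToBaseLoop f (X : Int) (B : Int) acc = pvCanon B X ++ acc := by
  intro f
  induction f with
  | zero => intro X acc h; omega
  | succ f ih =>
    intro X acc h
    rcases Nat.eq_zero_or_pos X with hX | hX
    · subst hX
      simp [pvToBaseLoop, pvCanon_zero]
    · have hgate : (0 : Int) < (X : Int) := by exact_mod_cast hX
      simp only [pvToBaseLoop, if_pos hgate]
      rw [show PySem.Int.floordiv (X : Int) (B : Int) = ((X / B : Nat) : Int) from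
            PySem.Int.floordiv_natCast X B,
          show PySem.Int.mod (X : Int) (B : Int) = ((X % B : Nat) : Int) from
            PySem.Int.mod_natCast X B,
          ih (X / B) _ (by have hd : X / B < X := Nat.div_lt_self hX (by omega); omega),
          pvCanon_pos B X hB hX]
      simp [pvChN]

-- A's loop, at the fuel the port supplies, for every integer x
theorem pvLoop_canon (B : Nat) (hB : 2 ≤ B) (x : Int) :
    pvToBaseLoop (x.toNat + 1) x (B : Int) [] = pvCanon B x.toNat := by
  rcases le_or_gt x 0 with hx | hx
  · have : x.toNat = 0 := by omega
    rw [this, pvCanon_zero]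
    simp [pvToBaseLoop, show ¬ (0:Int) < x by omega]
  · have hxX : x = (x.toNat : Int) := by omega
    calc pvToBaseLoop (x.toNat + 1) x (B : Int) []
        = pvToBaseLoop (x.toNat + 1) ((x.toNat : Nat) : Int) (B : Int) [] := by rw [← hxX]
      _ = pvCanon B x.toNat := by
          simpa using pvLoopNat B hB (x.toNat + 1) x.toNat [] (by omega)

-- B's toBase, for every integer x
theorem pvToBase_eq (B : Nat) (hB : 2 ≤ B) (x : Int) :
    pvToBase x (B : Int) = pvCanon B x.toNat := by
  unfold pvToBase
  rcases le_or_gt x 0 with hx | hx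
  · rw [if_pos hx]
    have : x.toNat = 0 := by omega
    rw [this, pvCanon_zero]
  · rw [if_neg (by omega)]
    set X := x.toNat with hX
    have hxX : x = (X : Int) := by omega
    have hbig : x < 1 * 2 ^ (x.toNat + 1) := by
      have h1 : X < 2 ^ X := Nat.lt_two_pow_self
      have h2 : (2:Nat) ^ X ≤ 2 ^ (X + 1) := Nat.pow_le_pow_right (by omega) (by omega)
      have h3 : X < 2 ^ (X + 1) := by omega
      rw [hxX, one_mul]
      exact_mod_cast h3
    obtain ⟨k, hfp, hle, hlt⟩ :=
      pvFindPow_spec B hB x (by omega) (x.toNat + 1) 1 0 (by norm_num) (by omega) hbig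
    have hkX : B ^ k ≤ X := by
      have : ((B ^ k : Nat) : Int) ≤ (X : Int) := by push_cast; rw [← hxX]; exact_mod_cast hle
      exact_mod_cast this
    have hkfuel : k < x.toNat + 1 := by
      have h2k : k < 2 ^ k := Nat.lt_two_pow_self
      have hBk : 2 ^ k ≤ B ^ k := Nat.pow_le_pow_left (by omega) k
      omega
    rw [hfp, hxX, pvEmit_eq B hB k (x.toNat + 1) X [] hkfuel (by rw [← hxX]; exact hlt)]
    have hltN : X < B ^ (k + 1) := by
      have : (X : Int) < ((B ^ (k+1) : Nat) : Int) := by push_cast; rw [← hxX]; exact_mod_cast hlt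
      exact_mod_cast this
    rw [List.nil_append, pvM_eq_canon B k X hB hkX hltN]

-- ===== VERDICT (by name: the statement is the Claim_ definition above) =====
theorem concatHex36_spec : Claim_equal_concatHex36 := by
  intro n _
  unfold Spec_concatHex36 concatHex36 concatHex36_alt
  rw [show (16:Int) = ((16:Nat):Int) by norm_num, show (36:Int) = ((36:Nat):Int) by norm_num,
    pvLoop_canon 16 (by norm_num), pvLoop_canon 36 (by norm_num),
    pvToBase_eq 16 (by norm_num), pvToBase_eq 36 (by norm_num)]
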